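-- pv_equiv track=rewrite | github.com/Narcolapser/adventofcode | 2023/03/d03.py | line_seek
-- ===== SOURCE A (Python) =====
-- def line_seek(line,pos):
--     # Search left
--     left = ''
--     left_cursor = pos -1
--     while left_cursor >= 0 and line[left_cursor].isdigit():
--         left = line[left_cursor] + left
--         left_cursor-=1
--
--     mid = line[pos] if line[pos].isdigit() else ''
--
--     # search right
--     right = ''
--     right_cursor = pos + 1
--     while right_cursor < len(line) and line[right_cursor].isdigit():
--         right += line[right_cursor]
--         right_cursor +=1
--
--     # If mid is a number, then we must concat everything.
--     if mid.isdigit():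
--         return [int(left+mid+right)]
--
--     # If not, then we have at most two digits.
--     result = []
--     if left.isdigit():
--         result.append(int(left))
--
--     if right.isdigit():
--         result.append(int(right))
--
--     return result
-- ===== SOURCE B (Python) =====
-- def line_seek(line, pos):
--     # One left-to-right pass: enumerate every maximal digit run [i, j) and
--     # keep those whose span touches pos (i <= pos + 1 and j >= pos).
--     result = []
--     i = 0
--     n = len(line)
--     while i < n:
--         if line[i].isdigit():
--             j = i + 1
--             while j < n and line[j].isdigit():
--                 j += 1
--             if i <= pos + 1 and j >= pos:
--                 result.append(int(line[i:j]))
--             i = j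
--         else:
--             i += 1
--     return result
-- ===== Notes on version B (the rewrite author's own statement) =====
-- stated objective: alternative
-- what changed: Replaces A's three-way local scan around pos (left while-loop, mid char, right while-loop) by a single left-to-right pass that enumerates every maximal digit run and keeps the runs whose span [i,j) touches pos (i <= pos+1 and j >= pos).
-- intended difference: For in-range negative pos (Python's negative-index wraparound, where A skips the left scan and its right scan wraps from the end of the line back to index 0) A returns numbers glued together from both ends of the line, e.g. A('5',-1)=[55]; B treats pos as the plain position it names and returns the digit runs touching it ([5] there), which is the intended reading. — e.g. on line_seek("5", -1): A returns [55], B returns [5]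
import Mathlib
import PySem

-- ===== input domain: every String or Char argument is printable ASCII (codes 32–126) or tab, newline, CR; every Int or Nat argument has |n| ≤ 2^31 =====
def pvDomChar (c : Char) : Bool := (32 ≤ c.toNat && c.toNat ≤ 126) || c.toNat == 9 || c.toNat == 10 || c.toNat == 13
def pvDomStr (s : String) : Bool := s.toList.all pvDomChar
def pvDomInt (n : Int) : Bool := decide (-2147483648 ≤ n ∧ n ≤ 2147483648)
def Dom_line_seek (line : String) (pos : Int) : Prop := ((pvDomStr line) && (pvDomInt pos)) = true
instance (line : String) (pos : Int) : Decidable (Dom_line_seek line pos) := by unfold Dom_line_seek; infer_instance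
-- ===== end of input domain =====

-- B replaces A's three-way local scan around pos by a single left-to-right pass over the
-- maximal digit runs of the line, keeping the runs whose span touches pos (alternative, same cost).


-- int(s) for the nonempty all-digit strings both programs feed it — exact there.
def pvDigitsToInt (ds : List Char) : Int :=
  ds.foldl (fun a c => a * 10 + ((c.toNat : Int) - 48)) 0

-- ===== PORT A =====
-- `while left_cursor >= 0 and line[left_cursor].isdigit(): left = line[left_cursor] + left; left_cursor -= 1`
-- (the pyGetD default ' ' is never read inside Pre_: the scan only reaches indexes 0..pos-1 < len)
def pvLeftScan (cs : List Char) (c : Int) : List Char :=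
  if _h : 0 ≤ c ∧ PySem.Chars.isdigit (PySem.List.pyGetD cs c ' ') = true then
    pvLeftScan cs (c - 1) ++ [PySem.List.pyGetD cs c ' ']
  else []
termination_by (c + 1).toNat
decreasing_by omega

-- `while right_cursor < len(line) and line[right_cursor].isdigit(): right += line[right_cursor]; right_cursor += 1`
-- (negative cursors wrap exactly as Python's line[right_cursor] does, via pyGetD;
--  the default ' ' is only read for cursor < -len, where Python would raise — outside Pre_)
def pvRightScan (cs : List Char) (c : Int) : List Char :=
  if _h : c < (cs.length : Int) ∧ PySem.Chars.isdigit (PySem.List.pyGetD cs c ' ') = true then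
    PySem.List.pyGetD cs c ' ' :: pvRightScan cs (c + 1)
  else []
termination_by ((cs.length : Int) - c).toNat
decreasing_by omega

def line_seek (line : String) (pos : Int) : List Int :=
  let cs := line.toList
  let left := pvLeftScan cs (pos - 1)
  match PySem.List.pyGet? cs pos with
  | none => []  -- line[pos] raises IndexError: excluded by Pre_
  | some mc =>
    let mid : List Char := if PySem.Chars.isdigit mc then [mc] else []
    let right := pvRightScan cs (pos + 1)
    if PySem.Chars.strIsdigit mid then [pvDigitsToInt (left ++ mid ++ right)]
    else
      (if PySem.Chars.strIsdigit left then [pvDigitsToInt left] else []) ++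
      (if PySem.Chars.strIsdigit right then [pvDigitsToInt right] else [])

-- ===== PORT B =====
-- Source B's single pass: i walks the line; at a digit, j = end of the maximal run, keep it if it
-- touches pos, continue at j.  The recursion consumes the run (takeWhile/dropWhile = the j-loop).
def pvRunsSeek (cs : List Char) (i : Int) (pos : Int) : List Int :=
  match cs with
  | [] => []
  | c :: rest =>
    if PySem.Chars.isdigit c then
      let t := rest.takeWhile (fun ch => PySem.Chars.isdigit ch)
      let e : Int := i + 1 + (t.length : Int)
      (if i ≤ pos + 1 ∧ pos ≤ e then [pvDigitsToInt (c :: t)] else []) ++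
        pvRunsSeek (rest.dropWhile (fun ch => PySem.Chars.isdigit ch)) e pos
    else pvRunsSeek rest (i + 1) pos
termination_by cs.length
decreasing_by
  · exact Nat.lt_succ_of_le (List.length_dropWhile_le _ _)
  · simp

def line_seek_alt (line : String) (pos : Int) : List Int :=
  pvRunsSeek line.toList 0 pos

-- ===== PRECONDITION & SPEC =====
-- Pre_ excludes exactly the pos outside [-len(line), len(line)), where A raises IndexError at line[pos].
def Pre_line_seek (line : String) (pos : Int) : Prop :=
  -(line.toList.length : Int) ≤ pos ∧ pos < (line.toList.length : Int)
instance (line : String) (pos : Int) : Decidable (Pre_line_seek line pos) := by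
  unfold Pre_line_seek; infer_instance
def pvWitness_line_seek : String × Int := ("a12b", 2)

-- For in-range negative pos (Python's negative-index wraparound, where A skips the left scan and
-- its right scan wraps from the end of the line back to index 0) A returns numbers glued together
-- from both ends of the line (A('5',-1) = [55]); B treats pos as the plain position it names and
-- returns the digit runs touching it ([5] there), which is the intended reading.
def D_line_seek (line : String) (pos : Int) : Prop :=
  let cs := line.toList
  let q := ((cs.length : Int) + pos).toNat
  pos < 0 ∧ -(cs.length : Int) ≤ pos ∧
  (PySem.Chars.isdigit (cs.getD q ' ') = true ∨ PySem.Chars.isdigit (cs.getD (q + 1) ' ') = true) ∧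
  ¬(pos = -1 ∧ cs.getD q ' ' = '0' ∧ PySem.Chars.isdigit (cs.getD 0 ' ') = true)
instance (line : String) (pos : Int) : Decidable (D_line_seek line pos) := by
  unfold D_line_seek; infer_instance

def Spec_line_seek (line : String) (pos : Int) (out : List Int) : Prop :=
  ¬ D_line_seek line pos → out = line_seek_alt line pos
instance (line : String) (pos : Int) (out : List Int) : Decidable (Spec_line_seek line pos out) := by
  unfold Spec_line_seek; infer_instance

def pvDiffWitness_line_seek : String × Int := ("5", -1)
def pvDiffWitnessOut_line_seek : (List Int) × (List Int) := ([55], [5])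

-- ===== CLAIM (what is proved, stated in full; the proofs are below) =====
def Claim_unchanged_line_seek : Prop := ∀ (line : String) (pos : Int), Dom_line_seek line pos → Pre_line_seek line pos → Spec_line_seek line pos (line_seek line pos)
def Claim_changed_line_seek : Prop := Dom_line_seek (pvDiffWitness_line_seek.1) (pvDiffWitness_line_seek.2) ∧ Pre_line_seek (pvDiffWitness_line_seek.1) (pvDiffWitness_line_seek.2) ∧ D_line_seek (pvDiffWitness_line_seek.1) (pvDiffWitness_line_seek.2) ∧ line_seek (pvDiffWitness_line_seek.1) (pvDiffWitness_line_seek.2) = pvDiffWitnessOut_line_seek.1 ∧ line_seek_alt (pvDiffWitness_line_seek.1) (pvDiffWitness_line_seek.2) = pvDiffWitnessOut_line_seek.2 ∧ pvDiffWitnessOut_line_seek.1 ≠ pvDiffWitnessOut_line_seek.2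
def Claim_exact_line_seek : Prop := ∀ (line : String) (pos : Int), Dom_line_seek line pos → Pre_line_seek line pos → D_line_seek line pos → line_seek line pos ≠ line_seek_alt line pos

-- ===== LEMMAS AND PROOFS =====

-- Characterisations of A's three scans, and the common shape `pvAcore` of A's result at a
-- genuine (non-negative, in-range) position.
def pvRunLeft (cs : List Char) (p : Nat) : List Char :=
  ((cs.take p).reverse.takeWhile (fun ch => PySem.Chars.isdigit ch)).reverse

def pvRunRight (cs : List Char) (p : Nat) : List Char :=
  (cs.drop p).takeWhile (fun ch => PySem.Chars.isdigit ch)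

def pvAcore (cs : List Char) (p : Nat) : List Int :=
  if PySem.Chars.isdigit (cs.getD p ' ') = true then
    [pvDigitsToInt (pvRunLeft cs p ++ cs.getD p ' ' :: pvRunRight cs (p + 1))]
  else
    (if pvRunLeft cs p = [] then [] else [pvDigitsToInt (pvRunLeft cs p)]) ++
    (if pvRunRight cs (p + 1) = [] then [] else [pvDigitsToInt (pvRunRight cs (p + 1))])

-- one-step unfoldings of B's pass
theorem pvRuns_digit (c : Char) (rest : List Char) (i pos : Int)
    (hd : PySem.Chars.isdigit c = true) :
    pvRunsSeek (c :: rest) i pos =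
      (if i ≤ pos + 1 ∧ pos ≤ i + 1 + ((rest.takeWhile (fun ch => PySem.Chars.isdigit ch)).length : Int)
        then [pvDigitsToInt (c :: rest.takeWhile (fun ch => PySem.Chars.isdigit ch))] else []) ++
        pvRunsSeek (rest.dropWhile (fun ch => PySem.Chars.isdigit ch))
          (i + 1 + ((rest.takeWhile (fun ch => PySem.Chars.isdigit ch)).length : Int)) pos := by
  rw [pvRunsSeek]
  simp only [hd, if_true]

theorem pvRuns_nondigit (c : Char) (rest : List Char) (i pos : Int)
    (hd : ¬ PySem.Chars.isdigit c = true) :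
    pvRunsSeek (c :: rest) i pos = pvRunsSeek rest (i + 1) pos := by
  rw [pvRunsSeek]
  simp only [hd, if_false, Bool.false_eq_true]

-- takeWhile over an append whose first part is all-true / contains a failure
theorem pvTW_all {xs ys : List Char} {f : Char → Bool} (h : ∀ x ∈ xs, f x = true) :
    List.takeWhile f (xs ++ ys) = xs ++ List.takeWhile f ys := by
  rw [List.takeWhile_append, if_pos]
  rw [List.takeWhile_eq_self_iff.2 h]

theorem pvTW_stop {xs ys : List Char} {f : Char → Bool} (h : ∃ x ∈ xs, f x = false) :
    List.takeWhile f (xs ++ ys) = List.takeWhile f xs := by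
  rw [List.takeWhile_append, if_neg]
  intro hlen
  have := List.takeWhile_eq_self_iff.1 ((List.takeWhile_sublist _).eq_of_length hlen)
  obtain ⟨x, hx, hfx⟩ := h
  simp [this x hx] at hfx

theorem pvTW_last {xs : List Char} {c : Char} {f : Char → Bool} (h : f c = false) :
    List.takeWhile f (xs ++ [c]) = List.takeWhile f xs := by
  rw [List.takeWhile_append]
  split
  · next hlen =>
    rw [(List.takeWhile_sublist _).eq_of_length hlen]
    simp [h]
  · rfl

-- the left scan computes pvRunLeft
theorem pvLeftScan_eq : ∀ (p : Nat) (cs : List Char), p ≤ cs.length →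
    pvLeftScan cs ((p : Int) - 1) = pvRunLeft cs p := by
  intro p
  induction p with
  | zero =>
    intro cs _
    rw [pvLeftScan, dif_neg (by omega)]
    simp [pvRunLeft]
  | succ p ih =>
    intro cs hlen
    have hp : p < cs.length := by omega
    have hcast : ((p + 1 : Nat) : Int) - 1 = (p : Int) := by push_cast; ring
    have hget : PySem.List.pyGetD cs ((p : Int)) ' ' = cs[p] :=
      PySem.List.pyGetD_eq_getElem cs ' ' (by omega) (by exact_mod_cast hp)
    have htake : cs.take (p + 1) = cs.take p ++ [cs[p]] := by
      rw [List.take_add_one]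
      simp [List.getElem?_eq_getElem hp]
    rw [hcast, pvLeftScan]
    by_cases hd : PySem.Chars.isdigit cs[p] = true
    · rw [dif_pos ⟨by omega, by rw [hget]; exact hd⟩]
      rw [ih cs (by omega), hget]
      unfold pvRunLeft
      rw [htake, List.reverse_append]
      simp only [List.reverse_cons, List.reverse_nil, List.nil_append, List.singleton_append]
      rw [List.takeWhile_cons_of_pos hd]
      simp
    · rw [dif_neg (by rw [hget]; intro hc; exact hd hc.2)]
      unfold pvRunLeft
      rw [htake, List.reverse_append]
      simp only [List.reverse_cons, List.reverse_nil, List.nil_append, List.singleton_append]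
      rw [List.takeWhile_cons_of_neg (by simpa using hd)]
      simp

-- the right scan (at a non-negative cursor) computes pvRunRight
theorem pvRightScan_eq : ∀ (k : Nat) (cs : List Char) (p : Nat), cs.length - p ≤ k →
    pvRightScan cs (p : Int) = pvRunRight cs p := by
  intro k
  induction k with
  | zero =>
    intro cs p hk
    rw [pvRightScan, dif_neg (by rintro ⟨h1, -⟩; omega)]
    unfold pvRunRight
    rw [List.drop_eq_nil_of_le (by omega)]
    rfl
  | succ k ih =>
    intro cs p hk
    by_cases hp : p < cs.length
    · have hget : PySem.List.pyGetD cs ((p : Int)) ' ' = cs[p] :=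
        PySem.List.pyGetD_eq_getElem cs ' ' (by omega) (by exact_mod_cast hp)
      have hdrop : cs.drop p = cs[p] :: cs.drop (p + 1) := List.drop_eq_getElem_cons hp
      rw [pvRightScan]
      by_cases hd : PySem.Chars.isdigit cs[p] = true
      · rw [dif_pos ⟨by exact_mod_cast hp, by rw [hget]; exact hd⟩]
        have : ((p : Int) + 1) = ((p + 1 : Nat) : Int) := by push_cast; ring
        rw [hget, this, ih cs (p + 1) (by omega)]
        unfold pvRunRight
        rw [hdrop, List.takeWhile_cons_of_pos hd]
      · rw [dif_neg (by rw [hget]; intro hc; exact hd hc.2)]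
        unfold pvRunRight
        rw [hdrop, List.takeWhile_cons_of_neg (by simpa using hd)]
    · rw [pvRightScan, dif_neg (by rintro ⟨h1, -⟩; omega)]
      unfold pvRunRight
      rw [List.drop_eq_nil_of_le (by omega)]
      rfl

theorem pvRunLeft_all {cs : List Char} {p : Nat} : ∀ x ∈ pvRunLeft cs p, PySem.Chars.isdigit x = true := by
  intro x hx
  exact List.mem_takeWhile_imp (List.mem_reverse.1 hx)

theorem pvRunRight_all {cs : List Char} {p : Nat} : ∀ x ∈ pvRunRight cs p, PySem.Chars.isdigit x = true := by
  intro x hx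
  exact List.mem_takeWhile_imp hx

theorem pvStrIsdigit_all {l : List Char} (h : ∀ x ∈ l, PySem.Chars.isdigit x = true) :
    PySem.Chars.strIsdigit l = !l.isEmpty := by
  cases l with
  | nil => rfl
  | cons c cs =>
    simp only [PySem.Chars.strIsdigit, List.isEmpty_cons, Bool.not_false, Bool.true_and]
    exact List.all_eq_true.2 h

-- A's value at a non-negative in-range position is pvAcore
theorem pvStrIsdigit_ne_nil {l : List Char} (h : ∀ x ∈ l, PySem.Chars.isdigit x = true)
    (hne : l ≠ []) : PySem.Chars.strIsdigit l = true := by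
  rw [pvStrIsdigit_all h]
  simpa using hne

theorem pvA_eq (line : String) (pos : Int) (h0 : 0 ≤ pos) (h1 : pos < (line.toList.length : Int)) :
    line_seek line pos = pvAcore line.toList pos.toNat := by
  have hplt : pos.toNat < line.toList.length := by omega
  have hpos : pos = ((pos.toNat : Nat) : Int) := by omega
  have hget : PySem.List.pyGet? line.toList pos = some (line.toList[pos.toNat]) :=
    PySem.List.pyGet?_eq_some_getElem line.toList h0 h1
  have hleft : pvLeftScan line.toList (pos - 1) = pvRunLeft line.toList pos.toNat := by
    rw [hpos]; exact pvLeftScan_eq pos.toNat line.toList (by omega)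
  have hright : pvRightScan line.toList (pos + 1) = pvRunRight line.toList (pos.toNat + 1) := by
    rw [hpos, show ((pos.toNat : Int) + 1) = ((pos.toNat + 1 : Nat) : Int) by omega]
    exact pvRightScan_eq line.toList.length line.toList (pos.toNat + 1) (by omega)
  have hgd : line.toList.getD pos.toNat ' ' = line.toList[pos.toNat] :=
    List.getD_eq_getElem line.toList ' ' hplt
  simp only [line_seek]
  rw [hget, hleft, hright]
  by_cases hd : PySem.Chars.isdigit (line.toList[pos.toNat]) = true
  · have hmid : PySem.Chars.strIsdigit [line.toList[pos.toNat]] = true := by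
      simp [PySem.Chars.strIsdigit, hd]
    simp only [hd, if_true, hmid]
    unfold pvAcore
    rw [hgd]
    simp only [hd, if_true]
    rw [List.append_assoc, List.singleton_append]
  · have hmid : PySem.Chars.strIsdigit ([] : List Char) = false := rfl
    simp only [hd, if_false, Bool.false_eq_true, hmid]
    unfold pvAcore
    rw [hgd]
    simp only [hd, if_false, Bool.false_eq_true]
    congr 1
    · by_cases hL : pvRunLeft line.toList pos.toNat = []
      · rw [hL]; rfl
      · rw [pvStrIsdigit_ne_nil pvRunLeft_all hL, if_pos rfl, if_neg hL]
    · by_cases hR : pvRunRight line.toList (pos.toNat + 1) = []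
      · rw [hR]; rfl
      · rw [pvStrIsdigit_ne_nil pvRunRight_all hR, if_pos rfl, if_neg hR]

-- B returns [] once the cursor has passed pos+1
theorem pvEmptyN : ∀ (N : Nat) (cs : List Char), cs.length ≤ N → ∀ (i pos : Int), pos + 1 < i →
    pvRunsSeek cs i pos = [] := by
  intro N
  induction N with
  | zero =>
    intro cs hlen i pos h
    have : cs = [] := List.eq_nil_of_length_eq_zero (by omega)
    subst this
    simp [pvRunsSeek]
  | succ N ih =>
    intro cs hlen i pos h
    match cs with
    | [] => simp [pvRunsSeek]
    | c :: rest =>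
      simp only [List.length_cons] at hlen
      by_cases hd : PySem.Chars.isdigit c = true
      · rw [pvRuns_digit c rest i pos hd, if_neg (by intro hc; have := hc.1; omega)]
        rw [List.nil_append]
        exact ih _ (le_trans (List.length_dropWhile_le _ _) (by omega)) _ _
          (by have : (0:Int) ≤ ((rest.takeWhile (fun ch => PySem.Chars.isdigit ch)).length : Int) := by positivity
              omega)
      · rw [pvRuns_nondigit c rest i pos hd]
        exact ih rest (by omega) (i + 1) pos (by omega)

theorem pvEmpty (cs : List Char) (i pos : Int) (h : pos + 1 < i) : pvRunsSeek cs i pos = [] :=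
  pvEmptyN cs.length cs le_rfl i pos h

-- B launched at cursor pos+1 returns exactly the digit run starting there (if any)
theorem pvHeadOnly (cs : List Char) (pos : Int) :
    pvRunsSeek cs (pos + 1) pos =
      if List.takeWhile (fun ch => PySem.Chars.isdigit ch) cs = [] then []
      else [pvDigitsToInt (List.takeWhile (fun ch => PySem.Chars.isdigit ch) cs)] := by
  cases cs with
  | nil => simp [pvRunsSeek]
  | cons c rest =>
    by_cases hd : PySem.Chars.isdigit c = true
    · have hlen : (0:Int) ≤ ((rest.takeWhile (fun ch => PySem.Chars.isdigit ch)).length : Int) := by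
        positivity
      rw [pvRuns_digit c rest _ _ hd, if_pos ⟨by omega, by omega⟩]
      rw [pvEmpty _ _ _ (by omega)]
      rw [List.takeWhile_cons_of_pos hd]
      simp
    · rw [pvRuns_nondigit c rest _ _ hd, List.takeWhile_cons_of_neg (by simpa using hd)]
      rw [pvEmpty _ _ _ (by omega)]
      simp

-- B's result only depends on pos - i
theorem pvShiftN : ∀ (N : Nat) (cs : List Char), cs.length ≤ N → ∀ (i pos k : Int),
    pvRunsSeek cs (i + k) (pos + k) = pvRunsSeek cs i pos := by
  intro N
  induction N with
  | zero =>
    intro cs hlen i pos k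
    have : cs = [] := List.eq_nil_of_length_eq_zero (by omega)
    subst this
    simp [pvRunsSeek]
  | succ N ih =>
    intro cs hlen i pos k
    match cs with
    | [] => simp [pvRunsSeek]
    | c :: rest =>
      simp only [List.length_cons] at hlen
      by_cases hd : PySem.Chars.isdigit c = true
      · rw [pvRuns_digit c rest _ _ hd, pvRuns_digit c rest _ _ hd]
        have htail : pvRunsSeek (rest.dropWhile (fun ch => PySem.Chars.isdigit ch))
            (i + k + 1 + ((rest.takeWhile (fun ch => PySem.Chars.isdigit ch)).length : Int)) (pos + k)
            = pvRunsSeek (rest.dropWhile (fun ch => PySem.Chars.isdigit ch))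
            (i + 1 + ((rest.takeWhile (fun ch => PySem.Chars.isdigit ch)).length : Int)) pos := by
          rw [show i + k + 1 + ((rest.takeWhile (fun ch => PySem.Chars.isdigit ch)).length : Int)
              = (i + 1 + ((rest.takeWhile (fun ch => PySem.Chars.isdigit ch)).length : Int)) + k by ring]
          exact ih _ (le_trans (List.length_dropWhile_le _ _) (by omega)) _ _ _
        rw [htail]
        by_cases hc : i ≤ pos + 1 ∧ pos ≤ i + 1 + ((rest.takeWhile (fun ch => PySem.Chars.isdigit ch)).length : Int)
        · rw [if_pos hc, if_pos (by omega)]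
        · rw [if_neg hc, if_neg (by omega)]
      · rw [pvRuns_nondigit c rest _ _ hd, pvRuns_nondigit c rest _ _ hd]
        rw [show i + k + 1 = (i + 1) + k by ring]
        exact ih rest (by omega) (i + 1) pos k

theorem pvShift (cs : List Char) (i pos k : Int) :
    pvRunsSeek cs (i + k) (pos + k) = pvRunsSeek cs i pos :=
  pvShiftN cs.length cs le_rfl i pos k

-- every element the right scan collects is a digit
theorem pvRightScan_all : ∀ (k : Nat) (cs : List Char) (c : Int), ((cs.length : Int) - c).toNat ≤ k →
    ∀ x ∈ pvRightScan cs c, PySem.Chars.isdigit x = true := by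
  intro k
  induction k with
  | zero =>
    intro cs c hk x hx
    rw [pvRightScan, dif_neg (by intro hc; have := hc.1; omega)] at hx
    simp at hx
  | succ k ih =>
    intro cs c hk x hx
    rw [pvRightScan] at hx
    by_cases hcond : c < (cs.length : Int) ∧ PySem.Chars.isdigit (PySem.List.pyGetD cs c ' ') = true
    · rw [dif_pos hcond] at hx
      rcases List.mem_cons.1 hx with h | h
      · rw [h]; exact hcond.2
      · exact ih cs (c + 1) (by omega) x h
    · rw [dif_neg hcond] at hx
      simp at hx

-- int(...) is linear in the accumulator
theorem pvDigits_foldl (r : List Char) : ∀ (a : Int),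
    r.foldl (fun a c => a * 10 + ((c.toNat : Int) - 48)) a
      = a * 10 ^ r.length + pvDigitsToInt r := by
  induction r with
  | nil => intro a; simp [pvDigitsToInt]
  | cons c r ih =>
    intro a
    simp only [List.foldl_cons, List.length_cons]
    rw [ih, show pvDigitsToInt (c :: r)
        = r.foldl (fun a c => a * 10 + ((c.toNat : Int) - 48)) (0 * 10 + ((c.toNat : Int) - 48))
        from rfl, ih]
    ring

theorem pvDigits_cons (c : Char) (r : List Char) :
    pvDigitsToInt (c :: r) = ((c.toNat : Int) - 48) * 10 ^ r.length + pvDigitsToInt r := by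
  rw [show pvDigitsToInt (c :: r)
      = r.foldl (fun a c => a * 10 + ((c.toNat : Int) - 48)) (0 * 10 + ((c.toNat : Int) - 48))
      from rfl, pvDigits_foldl]
  ring

-- MAIN: at a genuine position the two programs agree
theorem pvRevTW {u : List Char} (h : ∀ x ∈ u, PySem.Chars.isdigit x = true) :
    (u.reverse.takeWhile (fun ch => PySem.Chars.isdigit ch)).reverse = u := by
  rw [List.takeWhile_eq_self_iff.2 (by intro x hx; exact h x (List.mem_reverse.1 hx)),
    List.reverse_reverse]

theorem pvTWnil {d : List Char} (h : ∀ (hne : d ≠ []), PySem.Chars.isdigit (d.head hne) = false) :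
    List.takeWhile (fun ch => PySem.Chars.isdigit ch) d = [] := by
  cases d with
  | nil => rfl
  | cons c' d' =>
    exact List.takeWhile_cons_of_neg (by simpa using h (by simp))

theorem pvMainN : ∀ (N : Nat) (cs : List Char), cs.length ≤ N → ∀ (p : Nat), p < cs.length →
    pvAcore cs p = pvRunsSeek cs 0 (p : Int) := by
  intro N
  induction N with
  | zero => intro cs hlen p hp; omega
  | succ N ih =>
    intro cs hlen p hp
    match cs with
    | [] => simp at hp
    | c :: rest =>
      simp only [List.length_cons] at hlen hp
      by_cases hd : PySem.Chars.isdigit c = true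
      · -- the line starts with a digit run c :: t, followed by d (empty or non-digit-headed)
        set t := rest.takeWhile (fun ch => PySem.Chars.isdigit ch) with ht
        set d := rest.dropWhile (fun ch => PySem.Chars.isdigit ch) with hdd
        have hrest : t ++ d = rest := List.takeWhile_append_dropWhile
        have htall : ∀ x ∈ t, PySem.Chars.isdigit x = true := fun x hx => List.mem_takeWhile_imp hx
        have hrunall : ∀ x ∈ c :: t, PySem.Chars.isdigit x = true := by
          intro x hx
          rcases List.mem_cons.1 hx with h | h
          · rw [h]; exact hd
          · exact htall x h
        have hcs : c :: rest = (c :: t) ++ d := by rw [← hrest]; rfl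
        have hdhead : ∀ (hne : d ≠ []), PySem.Chars.isdigit (d.head hne) = false := by
          intro hne
          exact List.head_dropWhile_not _ hne
        have htwd : List.takeWhile (fun ch => PySem.Chars.isdigit ch) d = [] := pvTWnil hdhead
        have hlrest : t.length + d.length = rest.length := by rw [← hrest]; simp
        rw [pvRuns_digit c rest _ _ hd, ← ht, ← hdd]
        rcases lt_trichotomy p (t.length + 1) with hplt | hpeq | hpgt
        · -- p inside the first run: both sides are [int(c :: t)]
          have hplen : p < (c :: t).length := by simpa using hplt
          have hgd : (c :: rest).getD p ' ' = (c :: t)[p] := by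
            rw [hcs, List.getD_append _ _ _ _ hplen]
            exact List.getD_eq_getElem _ ' ' hplen
          have hgdig : PySem.Chars.isdigit ((c :: t)[p]) = true :=
            hrunall _ (List.getElem_mem hplen)
          have hleft : pvRunLeft (c :: rest) p = (c :: t).take p := by
            unfold pvRunLeft
            rw [hcs, List.take_append_of_le_length (by omega)]
            exact pvRevTW (by intro x hx; exact hrunall x (List.take_subset _ _ hx))
          have hright : pvRunRight (c :: rest) (p + 1) = (c :: t).drop (p + 1) := by
            unfold pvRunRight
            rw [hcs, List.drop_append_of_le_length (by omega)]
            rw [pvTW_all (by intro x hx; exact hrunall x (List.drop_subset _ _ hx)), htwd,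
              List.append_nil]
          have hAcore : pvAcore (c :: rest) p = [pvDigitsToInt (c :: t)] := by
            unfold pvAcore
            rw [hgd, if_pos hgdig, hleft, hright, List.getElem_cons_drop, List.take_append_drop]
          rw [hAcore, if_pos ⟨by omega, by omega⟩]
          have htail : pvRunsSeek d (0 + 1 + (t.length : Int)) (p : Int) = [] := by
            rcases Nat.lt_or_ge p t.length with hlt | hge
            · exact pvEmpty _ _ _ (by omega)
            · have hpt : p = t.length := by omega
              rw [show (0 + 1 + (t.length : Int)) = (p : Int) + 1 by omega, pvHeadOnly, htwd,
                if_pos rfl]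
          rw [htail, List.append_nil]
        · -- p is the first position after the run: A returns the run plus the run after the gap
          have hdne : d ≠ [] := by
            intro hnil
            rw [hnil] at hlrest
            simp at hlrest
            omega
          obtain ⟨c', d', hdc⟩ := List.exists_cons_of_ne_nil hdne
          have hc' : PySem.Chars.isdigit c' = false := by
            have h1 := hdhead hdne
            simp only [hdc, List.head_cons] at h1
            exact h1
          have hLlen : (c :: t).length = p := by simpa using hpeq.symm
          have hgd : (c :: rest).getD p ' ' = c' := by
            rw [hcs, List.getD_append_right _ _ _ _ (by omega), hLlen, Nat.sub_self, hdc]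
            rfl
          have hleft : pvRunLeft (c :: rest) p = c :: t := by
            unfold pvRunLeft
            rw [hcs, ← hLlen, List.take_left]
            exact pvRevTW hrunall
          have hright : pvRunRight (c :: rest) (p + 1)
              = List.takeWhile (fun ch => PySem.Chars.isdigit ch) d' := by
            unfold pvRunRight
            rw [hcs, List.drop_append, List.drop_eq_nil_of_le (by omega), hdc,
              show p + 1 - (c :: t).length = 1 by omega]
            rfl
          have hAcore : pvAcore (c :: rest) p
              = [pvDigitsToInt (c :: t)] ++
                (if List.takeWhile (fun ch => PySem.Chars.isdigit ch) d' = [] then []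
                 else [pvDigitsToInt (List.takeWhile (fun ch => PySem.Chars.isdigit ch) d')]) := by
            unfold pvAcore
            rw [hgd, hleft, hright, if_neg (by rw [hc']; simp)]
            rw [if_neg (by simp)]
          rw [hAcore, if_pos (show (0:Int) ≤ (p : Int) + 1 ∧ (p : Int) ≤ 0 + 1 + (t.length : Int)
            from ⟨by omega, by omega⟩)]
          congr 1
          rw [hdc, pvRuns_nondigit _ _ _ _ (by rw [hc']; simp)]
          rw [show (0 + 1 + (t.length : Int) + 1) = (p : Int) + 1 by omega]
          exact (pvHeadOnly d' (p : Int)).symm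
        · -- p beyond the first run: both sides recurse into d
          have hL : t.length + 1 ≤ p := le_of_lt hpgt
          have hpd : p - (t.length + 1) < d.length := by omega
          have hdne : d ≠ [] := by
            intro hnil
            rw [hnil] at hpd
            simp at hpd
          obtain ⟨c', d', hdc⟩ := List.exists_cons_of_ne_nil hdne
          have hc' : PySem.Chars.isdigit c' = false := by
            have h1 := hdhead hdne
            simp only [hdc, List.head_cons] at h1
            exact h1
          have hLlen : (c :: t).length = t.length + 1 := by simp
          have hgd : (c :: rest).getD p ' ' = d.getD (p - (t.length + 1)) ' ' := by
            rw [hcs, List.getD_append_right _ _ _ _ (by omega), hLlen]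
          have hleft : pvRunLeft (c :: rest) p = pvRunLeft d (p - (t.length + 1)) := by
            unfold pvRunLeft
            rw [hcs, List.take_append, List.take_of_length_le (by simp; omega), hLlen,
              List.reverse_append]
            rw [pvTW_stop]
            obtain ⟨k, hk⟩ := Nat.exists_eq_add_of_lt hpgt
            refine ⟨c', ?_, hc'⟩
            rw [List.mem_reverse, hdc, show p - (t.length + 1) = k + 1 by omega,
              List.take_succ_cons]
            exact List.mem_cons_self
          have hright : pvRunRight (c :: rest) (p + 1)
              = pvRunRight d (p - (t.length + 1) + 1) := by
            unfold pvRunRight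
            rw [hcs, List.drop_append, List.drop_eq_nil_of_le (by omega), hLlen,
              show p + 1 - (t.length + 1) = p - (t.length + 1) + 1 by omega]
            rfl
          have hAcore : pvAcore (c :: rest) p = pvAcore d (p - (t.length + 1)) := by
            unfold pvAcore
            rw [hgd, hleft, hright]
          rw [hAcore, if_neg (by intro hc; have := hc.2; omega)]
          rw [List.nil_append,
            show (0 + 1 + (t.length : Int)) = ((t.length + 1 : Nat) : Int) by push_cast; ring]
          have hshift : pvRunsSeek d ((t.length + 1 : Nat) : Int) (p : Int)
              = pvRunsSeek d 0 ((p - (t.length + 1) : Nat) : Int) := by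
            rw [show ((t.length + 1 : Nat) : Int) = 0 + ((t.length + 1 : Nat) : Int) by ring,
              show ((p : Nat) : Int) = ((p - (t.length + 1) : Nat) : Int) + ((t.length + 1 : Nat) : Int) by omega]
            exact pvShift d 0 _ _
          rw [hshift]
          exact ih d (by omega) (p - (t.length + 1)) hpd
      · -- non-digit head
        rw [pvRuns_nondigit c rest _ _ hd]
        cases p with
        | zero =>
          have hleft : pvRunLeft (c :: rest) 0 = [] := by simp [pvRunLeft]
          have hgd : (c :: rest).getD 0 ' ' = c := rfl
          have hright : pvRunRight (c :: rest) 1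
              = List.takeWhile (fun ch => PySem.Chars.isdigit ch) rest := rfl
          unfold pvAcore
          rw [hgd, if_neg hd, hleft, hright, if_pos rfl, List.nil_append]
          simp only [Nat.cast_zero]
          exact (pvHeadOnly rest 0).symm
        | succ q =>
          have hleft : pvRunLeft (c :: rest) (q + 1) = pvRunLeft rest q := by
            unfold pvRunLeft
            rw [List.take_succ_cons, List.reverse_cons, pvTW_last (by simpa using hd)]
          have hgd : (c :: rest).getD (q + 1) ' ' = rest.getD q ' ' := List.getD_cons_succ
          have hright : pvRunRight (c :: rest) (q + 1 + 1) = pvRunRight rest (q + 1) := by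
            unfold pvRunRight
            rw [show q + 1 + 1 = q + 2 by omega, List.drop_succ_cons]
          have hAcore : pvAcore (c :: rest) (q + 1) = pvAcore rest q := by
            unfold pvAcore
            rw [hgd, hleft, hright]
          rw [hAcore]
          have hshift : pvRunsSeek rest (0 + 1) (((q + 1 : Nat)) : Int)
              = pvRunsSeek rest 0 ((q : Nat) : Int) := by
            rw [show (((q + 1 : Nat)) : Int) = ((q : Nat) : Int) + 1 by push_cast; ring]
            exact pvShift rest 0 _ 1
          rw [hshift]
          exact ih rest (by omega) q (by omega)


-- A's value at pos = -1 (Python wraps to the last character; the left scan is skipped and the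
-- right scan starts at index 0)
theorem pvA_neg1 (line : String) (hne : line.toList ≠ []) :
    line_seek line (-1) =
      if PySem.Chars.isdigit (line.toList.getLast hne) = true then
        [pvDigitsToInt (line.toList.getLast hne ::
          List.takeWhile (fun ch => PySem.Chars.isdigit ch) line.toList)]
      else if List.takeWhile (fun ch => PySem.Chars.isdigit ch) line.toList = [] then []
      else [pvDigitsToInt (List.takeWhile (fun ch => PySem.Chars.isdigit ch) line.toList)] := by
  have hleft : pvLeftScan line.toList ((-1 : Int) - 1) = [] := by
    rw [pvLeftScan, dif_neg]
    rintro ⟨h1, -⟩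
    omega
  have hget : PySem.List.pyGet? line.toList (-1) = some (line.toList.getLast hne) := by
    rw [PySem.List.pyGet?_neg_one, List.getLast?_eq_some_getLast]
  have hright : pvRightScan line.toList ((-1 : Int) + 1)
      = List.takeWhile (fun ch => PySem.Chars.isdigit ch) line.toList := by
    rw [show ((-1 : Int) + 1) = ((0 : Nat) : Int) by norm_num,
      pvRightScan_eq line.toList.length line.toList 0 (by omega)]
    rfl
  simp only [line_seek]
  rw [hleft, hget, hright]
  by_cases hld : PySem.Chars.isdigit (line.toList.getLast hne) = true
  · have hmid : PySem.Chars.strIsdigit [line.toList.getLast hne] = true := by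
      simp only [PySem.Chars.strIsdigit, List.isEmpty_cons, List.all_cons, List.all_nil,
        Bool.and_true, Bool.not_false, Bool.true_and]
      exact hld
    simp only [hld, if_true, hmid]
    rw [List.nil_append, List.singleton_append]
  · have hmid : PySem.Chars.strIsdigit ([] : List Char) = false := rfl
    simp only [hld, if_false, Bool.false_eq_true, hmid]
    rw [List.nil_append]
    by_cases hR : List.takeWhile (fun ch => PySem.Chars.isdigit ch) line.toList = []
    · rw [hR, if_pos rfl]
      rfl
    · rw [if_neg hR, pvStrIsdigit_ne_nil (fun x hx => List.mem_takeWhile_imp hx) hR, if_pos rfl]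

-- B's value at pos = -1: only a run starting at index 0 can touch it
theorem pvB_neg1 (line : String) :
    line_seek_alt line (-1) =
      if List.takeWhile (fun ch => PySem.Chars.isdigit ch) line.toList = [] then []
      else [pvDigitsToInt (List.takeWhile (fun ch => PySem.Chars.isdigit ch) line.toList)] := by
  unfold line_seek_alt
  rw [show (0 : Int) = (-1 : Int) + 1 by norm_num]
  exact pvHeadOnly line.toList (-1)

-- A's value at an in-range pos ≤ -2: the left scan is skipped, the mid character is the wrapped
-- line[pos], and the right scan starts at the (still negative) cursor pos + 1
theorem pvA_neg2 (line : String) (pos : Int) (h2 : pos ≤ -2)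
    (hlo : -(line.toList.length : Int) ≤ pos) :
    line_seek line pos =
      if PySem.Chars.isdigit (line.toList.getD ((line.toList.length : Int) + pos).toNat ' ') = true
      then [pvDigitsToInt (line.toList.getD ((line.toList.length : Int) + pos).toNat ' '
              :: pvRightScan line.toList (pos + 1))]
      else if PySem.Chars.strIsdigit (pvRightScan line.toList (pos + 1)) = true
      then [pvDigitsToInt (pvRightScan line.toList (pos + 1))]
      else [] := by
  have hleft : pvLeftScan line.toList (pos - 1) = [] := by
    rw [pvLeftScan, dif_neg]
    rintro ⟨h1, -⟩
    omega
  have hidx : ((line.toList.length : Int) + pos).toNat < line.toList.length := by omega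
  have hget : PySem.List.pyGet? line.toList pos
      = some (line.toList[((line.toList.length : Int) + pos).toNat]) := by
    have h1 := PySem.List.pyGet?_neg_natCast (xs := line.toList) (k := (-pos).toNat)
      (by omega) (by omega)
    rw [show -(((-pos).toNat : Nat) : Int) = pos by omega] at h1
    rw [h1, show line.toList.length - (-pos).toNat = ((line.toList.length : Int) + pos).toNat by omega]
    exact List.getElem?_eq_getElem hidx
  have hgd : line.toList.getD ((line.toList.length : Int) + pos).toNat ' '
      = line.toList[((line.toList.length : Int) + pos).toNat] :=
    List.getD_eq_getElem _ ' ' hidx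
  simp only [line_seek]
  rw [hleft, hget, ← hgd]
  by_cases hmd : PySem.Chars.isdigit (line.toList.getD ((line.toList.length : Int) + pos).toNat ' ') = true
  · have hmid : PySem.Chars.strIsdigit [line.toList.getD ((line.toList.length : Int) + pos).toNat ' '] = true := by
      simp only [PySem.Chars.strIsdigit, List.isEmpty_cons, List.all_cons, List.all_nil,
        Bool.and_true, Bool.not_false, Bool.true_and]
      exact hmd
    simp only [hmd, if_true, hmid]
    rw [List.nil_append, List.singleton_append]
  · have hmid : PySem.Chars.strIsdigit ([] : List Char) = false := rfl
    simp only [hmd, if_false, Bool.false_eq_true, hmid]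
    rw [List.nil_append]

-- the class of a digit character's value
theorem pvDigitVal (c : Char) (h : PySem.Chars.isdigit c = true) (h2 : c ≠ '0') :
    1 ≤ (c.toNat : Int) - 48 ∧ (c.toNat : Int) - 48 ≤ 9 := by
  simp only [PySem.Chars.isdigit, Bool.and_eq_true, decide_eq_true_eq] at h
  obtain ⟨h1, h3⟩ := h
  rw [Char.le_def, UInt32.le_iff_toNat_le] at h1 h3
  have e0 : ('0' : Char).val.toNat = 48 := by decide
  have e9 : ('9' : Char).val.toNat = 57 := by decide
  have hne : c.val.toNat ≠ 48 := by
    intro hc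
    apply h2
    apply Char.ext
    apply UInt32.toNat_inj.mp
    rw [hc, e0]
  have hc : c.toNat = c.val.toNat := rfl
  rw [hc]
  omega

theorem pvDigits_zero_cons (r : List Char) : pvDigitsToInt ('0' :: r) = pvDigitsToInt r := by
  rw [pvDigits_cons, show ('0').toNat = 48 from rfl]
  norm_num

theorem pvTakeWhile_head_digit {c0 : Char} {cs' : List Char}
    (h : List.takeWhile (fun ch => PySem.Chars.isdigit ch) (c0 :: cs') ≠ []) :
    PySem.Chars.isdigit c0 = true := by
  by_contra hc
  exact h (List.takeWhile_cons_of_neg (by simpa using hc))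

-- ===== VERDICT (by name: the statement is the Claim_ definition above) =====
-- pyGetD at the still-negative right-scan start cursor pos + 1, as a plain getD
theorem pvGetD_neg (line : String) (pos : Int) (h2 : pos ≤ -2)
    (hlo : -(line.toList.length : Int) ≤ pos) :
    PySem.List.pyGetD line.toList (pos + 1) ' '
      = line.toList.getD ((line.toList.length : Int) + pos + 1).toNat ' ' := by
  have hi : ((line.toList.length : Int) + pos + 1).toNat < line.toList.length := by omega
  have h1 := PySem.List.pyGetD_neg_natCast (xs := line.toList) (k := (-(pos+1)).toNat) (d := ' ')
    (by omega) (by omega)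
  rw [show -(((-(pos+1)).toNat : Nat) : Int) = pos + 1 by omega] at h1
  calc PySem.List.pyGetD line.toList (pos + 1) ' '
      = line.toList[line.toList.length - (-(pos+1)).toNat] := h1
    _ = line.toList.getD (line.toList.length - (-(pos+1)).toNat) ' ' :=
        (List.getD_eq_getElem _ ' ' (by omega)).symm
    _ = line.toList.getD ((line.toList.length : Int) + pos + 1).toNat ' ' := by
        rw [show line.toList.length - (-(pos+1)).toNat
          = ((line.toList.length : Int) + pos + 1).toNat by omega]

theorem line_seek_spec : Claim_unchanged_line_seek := by
  intro line pos _ hpre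
  unfold Spec_line_seek
  intro hnd
  unfold Pre_line_seek at hpre
  obtain ⟨hlo, hhi⟩ := hpre
  by_cases hge : 0 ≤ pos
  · rw [pvA_eq line pos hge hhi]
    unfold line_seek_alt
    rw [pvMainN line.toList.length line.toList le_rfl pos.toNat (by omega),
      show ((pos.toNat : Nat) : Int) = pos by omega]
  · have hneg : pos < 0 := by omega
    have hite : ¬ ((PySem.Chars.isdigit (line.toList.getD ((line.toList.length : Int) + pos).toNat ' ') = true ∨
          PySem.Chars.isdigit (line.toList.getD (((line.toList.length : Int) + pos).toNat + 1) ' ') = true) ∧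
        ¬(pos = -1 ∧ line.toList.getD ((line.toList.length : Int) + pos).toNat ' ' = '0' ∧
          PySem.Chars.isdigit (line.toList.getD 0 ' ') = true)) := by
      intro hc
      exact hnd ⟨hneg, hlo, hc⟩
    by_cases hm1 : pos = -1
    · subst hm1
      have hne : line.toList ≠ [] := by
        intro h
        rw [h] at hlo
        simp at hlo
      have hlen1 : line.toList.length - 1 < line.toList.length := by
        have := List.length_pos_of_ne_nil hne
        omega
      have hq : ((line.toList.length : Int) + -1).toNat = line.toList.length - 1 := by omega
      have hq1 : line.toList.getD (((line.toList.length : Int) + -1).toNat + 1) ' ' = ' ' :=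
        List.getD_eq_default _ _ (by omega)
      have hldD : line.toList.getD (line.toList.length - 1) ' ' = line.toList.getLast hne := by
        rw [List.getD_eq_getElem _ _ hlen1, List.getLast_eq_getElem]
      rw [hq1, hq] at hite
      rw [pvA_neg1 line hne, pvB_neg1 line]
      by_cases hld : PySem.Chars.isdigit (line.toList.getLast hne) = true
      · have hboth : (-1 : Int) = -1 ∧ line.toList.getD (line.toList.length - 1) ' ' = '0' ∧
            PySem.Chars.isdigit (line.toList.getD 0 ' ') = true := by
          by_contra hB
          exact hite ⟨Or.inl (by rw [hldD]; exact hld), hB⟩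
        obtain ⟨-, hl0, hf⟩ := hboth
        obtain ⟨c0, cs', hc0⟩ := List.exists_cons_of_ne_nil hne
        have hdig0 : PySem.Chars.isdigit c0 = true := by
          have : line.toList.getD 0 ' ' = c0 := by rw [hc0]; rfl
          rw [this] at hf
          exact hf
        have htwne : List.takeWhile (fun ch => PySem.Chars.isdigit ch) line.toList ≠ [] := by
          rw [hc0, List.takeWhile_cons_of_pos hdig0]
          simp
        have hlast0 : line.toList.getLast hne = '0' := by rw [← hldD]; exact hl0
        rw [if_pos hld, if_neg htwne, hlast0, pvDigits_zero_cons]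
      · rw [if_neg hld]
    · have h2 : pos ≤ -2 := by omega
      have hcast : ((line.toList.length : Int) + pos).toNat + 1
          = ((line.toList.length : Int) + pos + 1).toNat := by omega
      have hdisj : ¬ (PySem.Chars.isdigit (line.toList.getD ((line.toList.length : Int) + pos).toNat ' ') = true ∨
          PySem.Chars.isdigit (line.toList.getD ((line.toList.length : Int) + pos + 1).toNat ' ') = true) := by
        rw [← hcast]
        intro h
        exact hite ⟨h, fun hx => hm1 hx.1⟩
      push Not at hdisj
      obtain ⟨hq1, hq2⟩ := hdisj
      rw [pvA_neg2 line pos h2 hlo]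
      have hrs : pvRightScan line.toList (pos + 1) = [] := by
        rw [pvRightScan, dif_neg]
        rintro ⟨-, hc2⟩
        rw [pvGetD_neg line pos h2 hlo] at hc2
        exact hq2 hc2
      rw [if_neg hq1, hrs, if_neg (by simp [PySem.Chars.strIsdigit])]
      unfold line_seek_alt
      rw [pvEmpty _ _ _ (by omega)]
theorem line_seek_changed : Claim_changed_line_seek := by
  unfold Claim_changed_line_seek pvDiffWitness_line_seek pvDiffWitnessOut_line_seek
  refine ⟨by decide, by decide, by decide, ?_, ?_, by decide⟩
  · show line_seek "5" (-1) = [55]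
    simp [line_seek, pvLeftScan, pvRightScan, pvDigitsToInt]
    decide
  · show line_seek_alt "5" (-1) = [5]
    simp [line_seek_alt, pvRunsSeek, pvDigitsToInt, List.takeWhile, List.dropWhile, PySem.Chars.isdigit]
theorem line_seek_tight : Claim_exact_line_seek := by
  intro line pos _ hpre hd
  unfold Pre_line_seek at hpre
  obtain ⟨hlo, hhi⟩ := hpre
  unfold D_line_seek at hd
  obtain ⟨hneg, -, hdisj, hnot⟩ := hd
  by_cases hm1 : pos = -1
  · subst hm1
    have hne : line.toList ≠ [] := by
      intro h
      rw [h] at hlo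
      simp at hlo
    have hlen1 : line.toList.length - 1 < line.toList.length := by
      have := List.length_pos_of_ne_nil hne
      omega
    have hq : ((line.toList.length : Int) + -1).toNat = line.toList.length - 1 := by omega
    have hqout : line.toList.getD (((line.toList.length : Int) + -1).toNat + 1) ' ' = ' ' :=
      List.getD_eq_default _ _ (by omega)
    have hldD : line.toList.getD (line.toList.length - 1) ' ' = line.toList.getLast hne := by
      rw [List.getD_eq_getElem _ _ hlen1, List.getLast_eq_getElem]
    rw [hqout, hq] at hdisj
    have hld' : PySem.Chars.isdigit (line.toList.getD (line.toList.length - 1) ' ') = true := by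
      rcases hdisj with h | h
      · exact h
      · exact absurd h (by simp [PySem.Chars.isdigit])
    rw [pvA_neg1 line hne, pvB_neg1 line, if_pos (by rw [← hldD]; exact hld')]
    by_cases htw : List.takeWhile (fun ch => PySem.Chars.isdigit ch) line.toList = []
    · rw [if_pos htw]
      simp
    · rw [if_neg htw]
      obtain ⟨c0, cs', hc0⟩ := List.exists_cons_of_ne_nil hne
      have hdig0 : PySem.Chars.isdigit c0 = true :=
        pvTakeWhile_head_digit (by rw [← hc0]; exact htw)
      have hlast0 : line.toList.getLast hne ≠ '0' := by
        intro h0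
        apply hnot
        refine ⟨rfl, by rw [hq, hldD]; exact h0, ?_⟩
        have hf : line.toList.getD 0 ' ' = c0 := by rw [hc0]; rfl
        rw [hf]
        exact hdig0
      have hv := pvDigitVal _ (by rw [hldD] at hld'; exact hld') hlast0
      intro heq
      simp only [List.cons.injEq, and_true] at heq
      rw [pvDigits_cons] at heq
      have hpow : (0:Int) < 10 ^ (List.takeWhile (fun ch => PySem.Chars.isdigit ch) line.toList).length := by
        positivity
      nlinarith [hv.1, hpow, heq]
  · have h2 : pos ≤ -2 := by omega
    have hcast : ((line.toList.length : Int) + pos).toNat + 1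
        = ((line.toList.length : Int) + pos + 1).toNat := by omega
    rw [hcast] at hdisj
    rw [pvA_neg2 line pos h2 hlo]
    unfold line_seek_alt
    rw [pvEmpty _ _ _ (by omega)]
    by_cases hq1 : PySem.Chars.isdigit (line.toList.getD ((line.toList.length : Int) + pos).toNat ' ') = true
    · rw [if_pos hq1]
      simp
    · have hq2 : PySem.Chars.isdigit (line.toList.getD ((line.toList.length : Int) + pos + 1).toNat ' ') = true := by
        rcases hdisj with h | h
        · exact absurd h hq1
        · exact h
      rw [if_neg hq1]
      have hcond : (pos + 1) < (line.toList.length : Int) ∧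
          PySem.Chars.isdigit (PySem.List.pyGetD line.toList (pos + 1) ' ') = true :=
        ⟨by omega, by rw [pvGetD_neg line pos h2 hlo]; exact hq2⟩
      have hrsne : pvRightScan line.toList (pos + 1) ≠ [] := by
        rw [pvRightScan, dif_pos hcond]
        simp
      have hrsall : ∀ x ∈ pvRightScan line.toList (pos + 1), PySem.Chars.isdigit x = true :=
        pvRightScan_all ((line.toList.length : Int) - (pos + 1)).toNat line.toList (pos + 1) le_rfl
      rw [if_pos (pvStrIsdigit_ne_nil hrsall hrsne)]
      simp
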